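-- pv_equiv track=rewrite | github.com/amshrestha2020/CodeSignal | CodeSignal/Core/MaximumSum.py | solution
-- ===== SOURCE A (Python) =====
-- def solution(a, q):
--     a.sort(reverse=True)
--     freq = [0] * len(a)
--     for l, r in q:
--         for i in range(l, r+1):
--             freq[i] += 1
--     order = sorted(range(len(a)), key=lambda i: -freq[i])
--     res = [0] * len(a)
--     for i, ai in zip(order, a):
--         res[i] = ai
--     return sum(sum(res[l:r+1]) for l, r in q)
-- ===== SOURCE B (Python) =====
-- def solution(a, q):
--     n = len(a)
--     diff = [0] * (n + 1)
--     for l, r in q: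
--         if l <= r:
--             diff[l] += 1
--             diff[r + 1] -= 1
--     freq = []
--     run = 0
--     for i in range(n):
--         run += diff[i]
--         freq.append(run)
--     vals = sorted(a, reverse=True)
--     cnts = sorted(freq, reverse=True)
--     return sum(c * v for c, v in zip(cnts, vals))
-- ===== Notes on version B (the rewrite author's own statement) =====
-- stated objective: alternative
-- what changed: Replaces per-query index loops and per-query slice summation over a placement array with a difference array + running prefix sum for coverage counts, then a single dot product of the descending-sorted counts with the descending-sorted values.
-- outside the precondition, e.g. on solution([1, 2], [(-1, 0)]): A returns 0, B returns -1; on solution([1, 2, 3, 4, 5], [(0, -2)]): A returns 14, B returns 0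
import Mathlib
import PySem

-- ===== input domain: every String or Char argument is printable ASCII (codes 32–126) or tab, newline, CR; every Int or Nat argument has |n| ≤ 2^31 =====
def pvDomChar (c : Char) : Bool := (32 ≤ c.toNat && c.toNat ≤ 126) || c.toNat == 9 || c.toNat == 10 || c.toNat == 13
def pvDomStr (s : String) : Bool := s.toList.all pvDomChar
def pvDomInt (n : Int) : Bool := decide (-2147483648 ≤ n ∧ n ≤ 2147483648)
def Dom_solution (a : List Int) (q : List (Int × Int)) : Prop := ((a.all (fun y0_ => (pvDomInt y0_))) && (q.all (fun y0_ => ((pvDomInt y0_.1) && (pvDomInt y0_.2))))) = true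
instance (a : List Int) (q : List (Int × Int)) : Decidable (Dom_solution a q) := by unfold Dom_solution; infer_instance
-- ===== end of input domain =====

-- B replaces A's per-query index loops and per-query slice sums by a difference array,
-- one prefix-sum pass and a single dot product of sorted counts with sorted values.
-- A sorts its argument a IN PLACE (a.sort(reverse=True)); B does not mutate a.
-- The equivalence proved here is about the RETURN value only.

-- ===== PORT A =====
-- xs[i] += d  (Python list element update; negative i wraps, out of range leaves xs — A raises there, outside Pre_)
def pvAddAt (xs : List Int) (i : Int) (d : Int) : List Int :=
  PySem.List.pySetD xs i (PySem.List.pyGetD xs i 0 + d)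

def solution (a : List Int) (q : List (Int × Int)) : Int :=
  let aS := PySem.List.sorted a (fun x => x) true
  let freq := q.foldl (fun f lr =>
      (PySem.List.pyRange lr.1 (lr.2 + 1) 1).foldl (fun f i => pvAddAt f i 1) f)
    (List.replicate a.length (0 : Int))
  let order := PySem.List.sorted (PySem.List.pyRange 0 (a.length : Int) 1)
      (fun i => -(PySem.List.pyGetD freq i 0)) false
  let res := (order.zip aS).foldl (fun r p => PySem.List.pySetD r p.1 p.2)
      (List.replicate a.length (0 : Int))
  (q.map (fun lr => (PySem.List.slice res (some lr.1) (some (lr.2 + 1))).sum)).sum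

-- ===== PORT B =====
def solution_alt (a : List Int) (q : List (Int × Int)) : Int :=
  let n := a.length
  let diff := q.foldl (fun d lr =>
      if lr.1 ≤ lr.2 then pvAddAt (pvAddAt d lr.1 1) (lr.2 + 1) (-1) else d)
    (List.replicate (n + 1) (0 : Int))
  let fr := (PySem.List.pyRange 0 (n : Int) 1).foldl
      (fun (s : List Int × Int) i =>
        let run := s.2 + PySem.List.pyGetD diff i 0
        (s.1 ++ [run], run)) ([], 0)
  let vals := PySem.List.sorted a (fun x => x) true
  let cnts := PySem.List.sorted fr.1 (fun x => x) true
  ((cnts.zip vals).map (fun p => p.1 * p.2)).sum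

-- ===== PRECONDITION & SPEC =====
-- Pre_ admits queries whose endpoints are valid indices (0 ≤ l and 0 ≤ r < len(a)) and
-- empty queries (r < l with an empty Python slice l:r+1 under clamping); it excludes
-- queries that only return via Python's accidental negative-index wraparound in the freq
-- updates / result slices, and queries with r ≥ len(a) on which A raises IndexError.
def Pre_solution (a : List Int) (q : List (Int × Int)) : Prop :=
  ∀ lr ∈ q, (0 ≤ lr.1 ∧ 0 ≤ lr.2 ∧ lr.2 < (a.length : Int))
    ∨ (lr.2 < lr.1 ∧
        PySem.List.clampIdx a.length (lr.2 + 1) ≤ PySem.List.clampIdx a.length lr.1)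
instance (a : List Int) (q : List (Int × Int)) : Decidable (Pre_solution a q) := by
  unfold Pre_solution; infer_instance

def pvWitness_solution : List Int × (List (Int × Int)) := ([3, 1, 2], [(0, 1), (1, 2), (1, 0)])

def Spec_solution (a : List Int) (q : List (Int × Int)) (out : Int) : Prop := out = solution_alt a q
instance (a : List Int) (q : List (Int × Int)) (out : Int) : Decidable (Spec_solution a q out) := by unfold Spec_solution; infer_instance

-- ===== CLAIM (what is proved, stated in full; the proofs are below) =====
def Claim_equal_solution : Prop := ∀ (a : List Int) (q : List (Int × Int)), Dom_solution a q → Pre_solution a q → Spec_solution a q (solution a q)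

-- ===== LEMMAS AND PROOFS =====

def pvCnt (q : List (Int × Int)) (j : Int) : Int :=
  (q.map (fun lr => if lr.1 ≤ j ∧ j ≤ lr.2 then (1 : Int) else 0)).sum

theorem pvAddAt_length (xs : List Int) (i d : Int) (h0 : 0 ≤ i) :
    (pvAddAt xs i d).length = xs.length := by
  simp [pvAddAt, PySem.List.pySetD_of_nonneg xs _ h0]

theorem pvAddAt_getD (xs : List Int) (i d : Int) (j : Nat)
    (h0 : 0 ≤ i) (hi : i < (xs.length : Int)) (hj : j < xs.length) :
    (pvAddAt xs i d).getD j 0 = xs.getD j 0 + (if (j : Int) = i then d else 0) := by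
  have hit : i.toNat < xs.length := by omega
  rw [pvAddAt, PySem.List.pySetD_of_nonneg xs _ h0,
      PySem.List.pyGetD_eq_getElem _ _ h0 hi]
  by_cases h : (j : Int) = i
  · have hji : j = i.toNat := by omega
    subst hji
    simp [List.getD_eq_getElem?_getD, hit, h]
  · have hne : i.toNat ≠ j := by omega
    simp [List.getD_eq_getElem?_getD, List.getElem?_set_ne hne, h]

-- A's inner loop over a list of in-range indices adds the occurrence count at each position
theorem pvFoldAdd (is : List Int) (f : List Int)
    (h : ∀ i ∈ is, 0 ≤ i ∧ i < (f.length : Int)) :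
    ((is.foldl (fun f i => pvAddAt f i 1) f).length = f.length) ∧
    (∀ j < f.length, (is.foldl (fun f i => pvAddAt f i 1) f).getD j 0
        = f.getD j 0 + (is.count (j : Int) : Int)) := by
  induction is generalizing f with
  | nil => simp
  | cons i is ih =>
    have h0 := (h i (by simp)).1
    have hi := (h i (by simp)).2
    have hlen : (pvAddAt f i 1).length = f.length := pvAddAt_length f i 1 h0
    have h' : ∀ x ∈ is, 0 ≤ x ∧ x < ((pvAddAt f i 1).length : Int) := by
      intro x hx; rw [hlen]; exact h x (by simp [hx])
    obtain ⟨l1, l2⟩ := ih (pvAddAt f i 1) h'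
    refine ⟨by rw [List.foldl_cons, l1, hlen], ?_⟩
    intro j hj
    rw [List.foldl_cons, l2 j (by omega), pvAddAt_getD f i 1 j h0 hi hj,
      List.count_cons]
    by_cases hc : (j : Int) = i
    · simp [hc]; ring
    · simp [hc, Ne.symm hc]

-- A's freq loop: pointwise closed form
theorem pvFreqA (q : List (Int × Int)) (f : List Int)
    (h : ∀ lr ∈ q, (0 ≤ lr.1 ∧ lr.2 < (f.length : Int)) ∨ lr.2 < lr.1) :
    ((q.foldl (fun f lr =>
        (PySem.List.pyRange lr.1 (lr.2 + 1) 1).foldl (fun f i => pvAddAt f i 1) f) f).length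
      = f.length) ∧
    (∀ j < f.length, (q.foldl (fun f lr =>
        (PySem.List.pyRange lr.1 (lr.2 + 1) 1).foldl (fun f i => pvAddAt f i 1) f) f).getD j 0
      = f.getD j 0 + pvCnt q (j : Int)) := by
  induction q generalizing f with
  | nil => simp [pvCnt]
  | cons lr q ih =>
    have hlr := h lr (by simp)
    have hmem : ∀ i ∈ PySem.List.pyRange lr.1 (lr.2 + 1) 1, 0 ≤ i ∧ i < (f.length : Int) := by
      intro i hi
      rw [PySem.List.mem_pyRange_one] at hi
      rcases hlr with hlr | hlr
      · constructor <;> omega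
      · omega
    obtain ⟨il, ig⟩ := pvFoldAdd (PySem.List.pyRange lr.1 (lr.2 + 1) 1) f hmem
    have h' : ∀ x ∈ q, (0 ≤ x.1 ∧ x.2 < (((PySem.List.pyRange lr.1 (lr.2 + 1) 1).foldl
        (fun f i => pvAddAt f i 1) f).length : Int)) ∨ x.2 < x.1 := by
      intro x hx; rw [il]; exact h x (by simp [hx])
    obtain ⟨l1, l2⟩ := ih _ h'
    refine ⟨by rw [List.foldl_cons, l1, il], ?_⟩
    intro j hj
    rw [List.foldl_cons, l2 j (by omega), ig j hj]
    have hcount : ((PySem.List.pyRange lr.1 (lr.2 + 1) 1).count (j : Int) : Int)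
        = (if lr.1 ≤ (j : Int) ∧ (j : Int) ≤ lr.2 then (1 : Int) else 0) := by
      by_cases hm : (j : Int) ∈ PySem.List.pyRange lr.1 (lr.2 + 1) 1
      · rw [List.count_eq_one_of_mem (PySem.List.nodup_pyRange_one _ _) hm]
        rw [PySem.List.mem_pyRange_one] at hm
        simp [show lr.1 ≤ (j : Int) ∧ (j : Int) ≤ lr.2 from ⟨hm.1, by omega⟩]
      · rw [List.count_eq_zero.mpr hm]
        rw [PySem.List.mem_pyRange_one] at hm
        simp only [Int.natCast_zero]
        rw [if_neg (by omega)]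
    rw [hcount]
    simp [pvCnt]
    ring

-- prefix sum of the first m entries
def pvS (d : List Int) (m : Nat) : Int := ((List.range m).map (fun j => d.getD j 0)).sum

theorem pvSumIte (m : Nat) (i δ : Int) (h0 : 0 ≤ i) :
    ((List.range m).map (fun (j : Nat) => if (j : Int) = i then δ else 0)).sum
      = if i < (m : Int) then δ else 0 := by
  induction m with
  | zero => simp; omega
  | succ m ih =>
    rw [List.range_succ, List.map_append, List.sum_append, ih]
    simp only [List.map_cons, List.map_nil, List.sum_cons, List.sum_nil]
    by_cases hc : (m : Int) = i
    · rw [if_neg (by omega), if_pos hc, if_pos (by omega)]; ring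
    · rw [if_neg hc]
      by_cases hm : i < (m : Int)
      · rw [if_pos hm, if_pos (by push_cast; omega)]; ring
      · rw [if_neg hm, if_neg (by push_cast; omega)]; ring

theorem pvS_addAt (d : List Int) (i δ : Int) (m : Nat)
    (h0 : 0 ≤ i) (hi : i < (d.length : Int)) :
    pvS (pvAddAt d i δ) m = pvS d m + (if i < (m : Int) then δ else 0) := by
  unfold pvS
  have hmap : (List.range m).map (fun j => (pvAddAt d i δ).getD j 0)
      = (List.range m).map (fun j => d.getD j 0 + (if (j : Int) = i then δ else 0)) := by
    apply List.map_congr_left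
    intro j hj
    by_cases hjl : j < d.length
    · exact pvAddAt_getD d i δ j h0 hi hjl
    · have hlen : (pvAddAt d i δ).length = d.length := pvAddAt_length d i δ h0
      rw [List.getD_eq_getElem?_getD, List.getD_eq_getElem?_getD,
        List.getElem?_eq_none (by omega), List.getElem?_eq_none (by omega)]
      rw [if_neg (by omega)]
      simp
  rw [hmap, PySem.List.sum_map_add_int, pvSumIte m i δ h0]

-- B's difference-array loop: prefix sums give coverage counts
theorem pvDiffFold (q : List (Int × Int)) (d : List Int)
    (h : ∀ lr ∈ q, (0 ≤ lr.1 ∧ lr.2 < (d.length : Int) - 1) ∨ lr.2 < lr.1) :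
    ((q.foldl (fun d lr =>
        if lr.1 ≤ lr.2 then pvAddAt (pvAddAt d lr.1 1) (lr.2 + 1) (-1) else d) d).length
      = d.length) ∧
    (∀ j : Nat, (j : Int) < (d.length : Int) - 1 →
      pvS (q.foldl (fun d lr =>
        if lr.1 ≤ lr.2 then pvAddAt (pvAddAt d lr.1 1) (lr.2 + 1) (-1) else d) d) (j + 1)
      = pvS d (j + 1) + pvCnt q (j : Int)) := by
  induction q generalizing d with
  | nil => simp [pvCnt]
  | cons lr q ih =>
    have hlr := h lr (by simp)
    by_cases hg : lr.1 ≤ lr.2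
    · obtain ⟨hl, hr⟩ : 0 ≤ lr.1 ∧ lr.2 < (d.length : Int) - 1 := by
        rcases hlr with h' | h'
        · exact h'
        · omega
      have hl1 : (0 : Int) ≤ lr.2 + 1 := by omega
      have hlen1 : (pvAddAt d lr.1 1).length = d.length := pvAddAt_length d lr.1 1 hl
      have hlen2 : (pvAddAt (pvAddAt d lr.1 1) (lr.2 + 1) (-1)).length = d.length := by
        rw [pvAddAt_length _ _ _ hl1, hlen1]
      have h' : ∀ x ∈ q, (0 ≤ x.1 ∧ x.2
          < ((pvAddAt (pvAddAt d lr.1 1) (lr.2 + 1) (-1)).length : Int) - 1) ∨ x.2 < x.1 := by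
        intro x hx; rw [hlen2]; exact h x (by simp [hx])
      obtain ⟨l1, l2⟩ := ih _ h'
      refine ⟨by simp only [List.foldl_cons, if_pos hg]; rw [l1, hlen2], ?_⟩
      intro j hj
      simp only [List.foldl_cons, if_pos hg]
      rw [l2 j (by omega),
        pvS_addAt _ (lr.2 + 1) (-1) (j + 1) hl1 (by rw [hlen1]; omega),
        pvS_addAt _ lr.1 1 (j + 1) hl (by omega)]
      have hcons : pvCnt (lr :: q) (j : Int)
          = (if lr.1 ≤ (j : Int) ∧ (j : Int) ≤ lr.2 then (1 : Int) else 0)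
            + pvCnt q (j : Int) := by simp [pvCnt]
      rw [hcons]
      split_ifs <;> omega
    · have h' : ∀ x ∈ q, (0 ≤ x.1 ∧ x.2 < ((d : List Int).length : Int) - 1) ∨ x.2 < x.1 := by
        intro x hx; exact h x (by simp [hx])
      obtain ⟨l1, l2⟩ := ih _ h'
      refine ⟨by simp only [List.foldl_cons, if_neg hg]; rw [l1], ?_⟩
      intro j hj
      simp only [List.foldl_cons, if_neg hg]
      rw [l2 j hj]
      have : ¬ (lr.1 ≤ (j : Int) ∧ (j : Int) ≤ lr.2) := by omega
      simp [pvCnt, this]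

theorem pvS_succ (d : List Int) (n : Nat) : pvS d (n + 1) = pvS d n + d.getD n 0 := by
  unfold pvS
  rw [List.range_succ, List.map_append, List.sum_append]
  simp

-- B's running-sum loop builds the list of prefix sums
theorem pvBuildFold (d : List Int) (n : Nat) :
    (PySem.List.pyRange 0 (n : Int) 1).foldl
      (fun (s : List Int × Int) i =>
        let run := s.2 + PySem.List.pyGetD d i 0
        (s.1 ++ [run], run)) ([], 0)
    = ((List.range n).map (fun i => pvS d (i + 1)), pvS d n) := by
  induction n with
  | zero => simp [pvS]
  | succ n ih =>
    have hsplit : PySem.List.pyRange 0 ((n + 1 : Nat) : Int) 1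
        = PySem.List.pyRange 0 (n : Int) 1 ++ [(n : Int)] := by
      push_cast
      exact PySem.List.pyRange_one_succ_right (by omega)
    rw [hsplit, List.foldl_append, ih]
    simp only [List.range_succ, List.map_append, List.map_cons, List.map_nil,
      List.foldl_cons, List.foldl_nil, PySem.List.pyGetD_natCast]
    rw [pvS_succ]

-- A's placement loop: each listed index receives its paired value, others keep r
theorem pvSetFold (ps : List (Int × Int)) (r : List Int)
    (hn : (ps.map Prod.fst).Nodup)
    (hb : ∀ p ∈ ps, 0 ≤ p.1 ∧ p.1 < (r.length : Int)) :
    ((ps.foldl (fun r p => PySem.List.pySetD r p.1 p.2) r).length = r.length) ∧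
    (∀ p ∈ ps, (ps.foldl (fun r p => PySem.List.pySetD r p.1 p.2) r).getD p.1.toNat 0 = p.2) ∧
    (∀ j : Nat, (j : Int) ∉ ps.map Prod.fst →
      (ps.foldl (fun r p => PySem.List.pySetD r p.1 p.2) r).getD j 0 = r.getD j 0) := by
  induction ps generalizing r with
  | nil => simp
  | cons p ps ih =>
    obtain ⟨h0, hlt⟩ := hb p (by simp)
    have hset : PySem.List.pySetD r p.1 p.2 = r.set p.1.toNat p.2 :=
      PySem.List.pySetD_of_nonneg r p.2 h0
    have hlen : (r.set p.1.toNat p.2).length = r.length := by simp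
    have hn' : (ps.map Prod.fst).Nodup := (List.nodup_cons.mp (by simpa using hn)).2
    have hnm : p.1 ∉ ps.map Prod.fst := (List.nodup_cons.mp (by simpa using hn)).1
    have hb' : ∀ x ∈ ps, 0 ≤ x.1 ∧ x.1 < (((r.set p.1.toNat p.2) : List Int).length : Int) := by
      intro x hx; rw [hlen]; exact hb x (by simp [hx])
    obtain ⟨l1, l2, l3⟩ := ih (r.set p.1.toNat p.2) hn' hb'
    simp only [List.foldl_cons, hset]
    refine ⟨by rw [l1, hlen], ?_, ?_⟩
    · intro x hx
      rcases List.mem_cons.mp hx with rfl | hx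
      · rw [l3 x.1.toNat (by simpa [Int.toNat_of_nonneg h0] using hnm)]
        rw [List.getD_eq_getElem?_getD, List.getElem?_set_self (by omega)]
        simp
      · exact l2 x hx
    · intro j hj
      simp only [List.map_cons, List.mem_cons, not_or] at hj
      rw [l3 j (by exact hj.2)]
      rw [List.getD_eq_getElem?_getD, List.getElem?_set_ne (by omega),
        ← List.getD_eq_getElem?_getD]

theorem pvTakeDrop (xs : List Int) (a b : Nat) (h : a + b ≤ xs.length) :
    List.take b (List.drop a xs) = (List.range b).map (fun k => xs.getD (a + k) 0) := by
  apply List.ext_getElem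
  · simp; omega
  · intro i h1 h2
    have hib : i < b := by simp at h1; omega
    have hax : a + i < xs.length := by omega
    rw [List.getElem_take, List.getElem_drop]
    simp only [List.getElem_map, List.getElem_range]
    rw [List.getD_eq_getElem xs 0 hax]

-- a query's slice sum as a 0-padded sum over all indices
theorem pvSliceWin (xs : List Int) (l r : Int) (hl : 0 ≤ l) (hr0 : 0 ≤ r)
    (hr : r < (xs.length : Int)) :
    (PySem.List.slice xs (some l) (some (r + 1))).sum
      = ((List.range xs.length).map
          (fun (j : Nat) => if l ≤ (j : Int) ∧ (j : Int) ≤ r then xs.getD j 0 else 0)).sum := by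
  rw [PySem.List.slice_toNat xs hl (by omega)]
  by_cases hlr : l ≤ r
  · set a := l.toNat with ha
    set b := (r + 1).toNat - l.toNat with hb
    set c := xs.length - (r + 1).toNat with hc
    have hn : xs.length = a + (b + c) := by omega
    rw [pvTakeDrop xs a ((r + 1).toNat - a) (by omega), ← hb]
    conv_rhs => rw [hn, List.range_add, List.range_add]
    rw [List.map_append, List.sum_append, List.map_map, List.map_append,
      List.map_map, List.sum_append]
    have s1 : ((List.range a).map
        (fun (j : Nat) => if l ≤ (j : Int) ∧ (j : Int) ≤ r then xs.getD j 0 else 0)).sum = 0 := by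
      apply List.sum_eq_zero
      intro x hx
      obtain ⟨j, hj, rfl⟩ := List.mem_map.mp hx
      rw [List.mem_range] at hj
      rw [if_neg (by omega)]
    have s3 : ((List.range c).map
        (((fun (j : Nat) => if l ≤ (j : Int) ∧ (j : Int) ≤ r then xs.getD j 0 else 0)
          ∘ (fun x => a + x)) ∘ (fun x => b + x))).sum = 0 := by
      apply List.sum_eq_zero
      intro x hx
      obtain ⟨k, hk, rfl⟩ := List.mem_map.mp hx
      rw [List.mem_range] at hk
      simp only [Function.comp_apply]
      rw [if_neg (by omega)]
    have s2 : ((List.range b).map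
        ((fun (j : Nat) => if l ≤ (j : Int) ∧ (j : Int) ≤ r then xs.getD j 0 else 0)
          ∘ (fun x => a + x))).sum
        = ((List.range b).map (fun k => xs.getD (a + k) 0)).sum := by
      congr 1
      apply List.map_congr_left
      intro k hk
      rw [List.mem_range] at hk
      simp only [Function.comp_apply]
      rw [if_pos (by omega)]
    rw [s1, s3, s2]
    ring
  · have hb0 : (r + 1).toNat - l.toNat = 0 := by omega
    rw [hb0]
    simp only [List.take_zero, List.sum_nil]
    symm
    apply List.sum_eq_zero
    intro x hx
    obtain ⟨j, hj, rfl⟩ := List.mem_map.mp hx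
    rw [if_neg (by omega)]
theorem pvSumSwap (q : List (Int × Int)) (n : Nat) (F : (Int × Int) → Nat → Int) :
    (q.map (fun x => ((List.range n).map (F x)).sum)).sum
      = ((List.range n).map (fun j => (q.map (fun x => F x j)).sum)).sum := by
  induction q with
  | nil =>
    simp only [List.map_nil, List.sum_nil]
    symm
    apply List.sum_eq_zero
    intro x hx
    obtain ⟨j, _, rfl⟩ := List.mem_map.mp hx
    rfl
  | cons x q ih =>
    simp only [List.map_cons, List.sum_cons, ih]
    rw [← PySem.List.sum_map_add_int (List.range n) (F x)
      (fun j => (q.map (fun y => F y j)).sum)]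

theorem pvFactor (q : List (Int × Int)) (j v : Int) :
    (q.map (fun lr => if lr.1 ≤ j ∧ j ≤ lr.2 then v else 0)).sum = pvCnt q j * v := by
  induction q with
  | nil => simp [pvCnt]
  | cons lr q ih =>
    simp only [List.map_cons, List.sum_cons, ih, pvCnt]
    split_ifs <;> ring

theorem pvS_zero (m k : Nat) : pvS (List.replicate m (0 : Int)) k = 0 := by
  apply List.sum_eq_zero
  intro x hx
  obtain ⟨j, _, rfl⟩ := List.mem_map.mp hx
  rw [List.getD_eq_getElem?_getD, List.getElem?_replicate]
  split_ifs <;> rfl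

theorem pvMapGetDRange (xs : List Int) :
    (List.range xs.length).map (fun j => xs.getD j 0) = xs := by
  apply List.ext_getElem
  · simp
  · intro i h1 h2
    simp only [List.getElem_map, List.getElem_range]
    rw [List.getD_eq_getElem xs 0 h2]
-- the frequencies read off along A's order are Python's sorted(freq, reverse=True)
theorem pvOrderMap (fL : List Int) :
    (PySem.List.sorted (PySem.List.pyRange 0 (fL.length : Int) 1)
        (fun i => -(PySem.List.pyGetD fL i 0)) false).map (fun i => PySem.List.pyGetD fL i 0)
      = PySem.List.sorted fL (fun x => x) true := by
  have hmapid : (PySem.List.pyRange 0 (fL.length : Int) 1).map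
      (fun i => PySem.List.pyGetD fL i 0) = fL := by
    rw [PySem.List.pyRange_one, List.map_map,
      show (((fL.length : Int)) - 0).toNat = fL.length by omega]
    have hfn : ((fun i => PySem.List.pyGetD fL i 0) ∘ fun (k : Nat) => (0 : Int) + k)
        = fun (k : Nat) => fL.getD k 0 := by
      funext k
      simp [PySem.List.pyGetD_natCast]
    rw [hfn, pvMapGetDRange]
  have hperm : ((PySem.List.sorted (PySem.List.pyRange 0 (fL.length : Int) 1)
      (fun i => -(PySem.List.pyGetD fL i 0)) false).map
      (fun i => PySem.List.pyGetD fL i 0)).Perm fL := by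
    have := (PySem.List.sorted_perm (PySem.List.pyRange 0 (fL.length : Int) 1)
      (fun i => -(PySem.List.pyGetD fL i 0)) false).map (fun i => PySem.List.pyGetD fL i 0)
    rwa [hmapid] at this
  have hpairL : ((PySem.List.sorted (PySem.List.pyRange 0 (fL.length : Int) 1)
      (fun i => -(PySem.List.pyGetD fL i 0)) false).map
      (fun i => PySem.List.pyGetD fL i 0)).Pairwise (fun x y => y ≤ x) := by
    rw [List.pairwise_map]
    exact (PySem.List.sorted_pairwise (PySem.List.pyRange 0 (fL.length : Int) 1)
      (fun i => -(PySem.List.pyGetD fL i 0))).imp (by intro a b h; omega)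
  have hpairR : (PySem.List.sorted fL (fun x => x) true).Pairwise
      (fun x y : Int => y ≤ x) := PySem.List.sorted_pairwise_rev fL (fun x => x)
  exact List.eq_of_perm_of_sorted
    (fun a b _ _ h1 h2 => le_antisymm h2 h1) hpairL hpairR
    (hperm.trans (PySem.List.sorted_perm fL (fun x => x) true).symm)
theorem pvMain (a : List Int) (q : List (Int × Int))
    (hpre : ∀ lr ∈ q, (0 ≤ lr.1 ∧ 0 ≤ lr.2 ∧ lr.2 < (a.length : Int))
      ∨ (lr.2 < lr.1 ∧
          PySem.List.clampIdx a.length (lr.2 + 1) ≤ PySem.List.clampIdx a.length lr.1)) :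
    solution a q = solution_alt a q := by
  set aS := PySem.List.sorted a (fun x => x) true with hAS
  set fA := q.foldl (fun f lr =>
      (PySem.List.pyRange lr.1 (lr.2 + 1) 1).foldl (fun f i => pvAddAt f i 1) f)
    (List.replicate a.length (0 : Int)) with hfA
  set ord := PySem.List.sorted (PySem.List.pyRange 0 (a.length : Int) 1)
      (fun i => -(PySem.List.pyGetD fA i 0)) false with hord
  set res := (ord.zip aS).foldl (fun r p => PySem.List.pySetD r p.1 p.2)
      (List.replicate a.length (0 : Int)) with hres
  set dB := q.foldl (fun d lr =>
      if lr.1 ≤ lr.2 then pvAddAt (pvAddAt d lr.1 1) (lr.2 + 1) (-1) else d)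
    (List.replicate (a.length + 1) (0 : Int)) with hdB
  have hAeq : solution a q
      = (q.map (fun lr => (PySem.List.slice res (some lr.1) (some (lr.2 + 1))).sum)).sum := rfl
  have hBeq : solution_alt a q
      = (((PySem.List.sorted ((PySem.List.pyRange 0 (a.length : Int) 1).foldl
            (fun (s : List Int × Int) i =>
              (s.1 ++ [s.2 + PySem.List.pyGetD dB i 0], s.2 + PySem.List.pyGetD dB i 0)) ([], 0)).1
          (fun x => x) true).zip aS).map (fun p => p.1 * p.2)).sum := rfl
  rw [hAeq, hBeq]
  -- basic facts
  have hrep : ∀ (m j : Nat), (List.replicate m (0 : Int)).getD j 0 = 0 := by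
    intro m j
    rw [List.getD_eq_getElem?_getD, List.getElem?_replicate]
    split_ifs <;> rfl
  set freqL := (List.range a.length).map (fun (j : Nat) => pvCnt q (j : Int)) with hfreqL
  have hfreqLlen : freqL.length = a.length := by simp [hfreqL]
  -- A's freq = freqL
  obtain ⟨hfAlen, hfAget⟩ := pvFreqA q (List.replicate a.length (0 : Int))
    (by intro lr hlr; simp only [List.length_replicate]
        rcases hpre lr hlr with ⟨h1, _, h3⟩ | ⟨h1, _⟩
        · exact Or.inl ⟨h1, h3⟩
        · exact Or.inr h1)
  rw [List.length_replicate] at hfAlen hfAget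
  rw [← hfA] at hfAlen hfAget
  have hfAeq : fA = freqL := by
    apply List.ext_getElem (by rw [hfAlen, hfreqLlen])
    intro j h1 h2
    have hj : j < a.length := by rwa [hfAlen] at h1
    rw [← List.getD_eq_getElem _ 0, ← List.getD_eq_getElem _ 0]
    rw [hfAget j hj, hrep, hfreqL, PySem.List.getD_map_range _ _ _ _ hj]
    ring
  -- B's freq list = freqL
  obtain ⟨hdlen, hdS⟩ := pvDiffFold q (List.replicate (a.length + 1) (0 : Int))
    (by intro lr hlr; simp only [List.length_replicate]
        rcases hpre lr hlr with ⟨h1, _, h3⟩ | ⟨h1, _⟩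
        · refine Or.inl ⟨h1, ?_⟩
          push_cast
          omega
        · exact Or.inr h1)
  rw [List.length_replicate] at hdlen hdS
  have hfr1 : ((PySem.List.pyRange 0 (a.length : Int) 1).foldl
      (fun (s : List Int × Int) i =>
        (s.1 ++ [s.2 + PySem.List.pyGetD dB i 0], s.2 + PySem.List.pyGetD dB i 0)) ([], 0)).1
      = freqL := by
    rw [← hdB] at hdS
    rw [pvBuildFold dB a.length]
    simp only
    apply List.map_congr_left
    intro i hi
    rw [List.mem_range] at hi
    rw [hdS i (by push_cast; omega), pvS_zero]
    ring
  rw [hfr1]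
  -- order facts
  have hordperm : ord.Perm (PySem.List.pyRange 0 (a.length : Int) 1) :=
    PySem.List.sorted_perm _ _ _
  have hordlen : ord.length = a.length := by
    rw [hordperm.length_eq, PySem.List.length_pyRange_one]
    omega
  have haSlen : aS.length = a.length := (PySem.List.sorted_perm a _ _).length_eq
  have hordmem : ∀ i ∈ ord, 0 ≤ i ∧ i < (a.length : Int) := by
    intro i hi
    have := hordperm.subset hi
    rw [PySem.List.mem_pyRange_one] at this
    exact ⟨this.1, by omega⟩
  have hordnodup : ord.Nodup := hordperm.nodup_iff.mpr (PySem.List.nodup_pyRange_one _ _)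
  have hfst : (ord.zip aS).map Prod.fst = ord :=
    List.map_fst_zip (by omega)
  obtain ⟨hreslen, hresget, _⟩ := pvSetFold (ord.zip aS) (List.replicate a.length (0 : Int))
    (by rw [hfst]; exact hordnodup)
    (by intro p hp
        have h1 := (List.of_mem_zip hp).1
        simp only [List.length_replicate]
        exact hordmem p.1 h1)
  rw [← hres] at hreslen hresget
  rw [List.length_replicate] at hreslen
  -- A's sum: slice sums → windowed sums over all indices
  have stepA1 : (q.map (fun lr => (PySem.List.slice res (some lr.1) (some (lr.2 + 1))).sum)).sum
      = (q.map (fun lr => ((List.range a.length).map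
          (fun (j : Nat) => if lr.1 ≤ (j : Int) ∧ (j : Int) ≤ lr.2 then res.getD j 0 else 0)).sum)).sum := by
    congr 1
    apply List.map_congr_left
    intro lr hlr
    rcases hpre lr hlr with ⟨h1, h2, h3⟩ | ⟨h1, h2⟩
    · rw [pvSliceWin res lr.1 lr.2 h1 h2 (by rw [hreslen]; exact h3), hreslen]
    · have hemp : PySem.List.slice res (some lr.1) (some (lr.2 + 1)) = [] := by
        apply List.eq_nil_of_length_eq_zero
        rw [PySem.List.length_slice, hreslen]
        omega
      rw [hemp]
      simp only [List.sum_nil]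
      symm
      apply List.sum_eq_zero
      intro x hx
      obtain ⟨j, _, rfl⟩ := List.mem_map.mp hx
      rw [if_neg (by omega)]
  rw [stepA1, pvSumSwap q a.length
    (fun lr (j : Nat) => if lr.1 ≤ (j : Int) ∧ (j : Int) ≤ lr.2 then res.getD j 0 else 0)]
  have stepA3 : (List.range a.length).map (fun (j : Nat) => (q.map
        (fun lr => if lr.1 ≤ (j : Int) ∧ (j : Int) ≤ lr.2 then res.getD j 0 else 0)).sum)
      = (List.range a.length).map (fun (j : Nat) => pvCnt q (j : Int) * res.getD j 0) := by
    apply List.map_congr_left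
    intro j hj
    exact pvFactor q (j : Int) (res.getD j 0)
  rw [stepA3]
  -- reindex along ord
  have hPyR : (List.range a.length).map (fun (j : Nat) => pvCnt q (j : Int) * res.getD j 0)
      = (PySem.List.pyRange 0 (a.length : Int) 1).map
          (fun i => pvCnt q i * res.getD i.toNat 0) := by
    rw [PySem.List.pyRange_one, List.map_map,
      show (((a.length : Int)) - 0).toNat = a.length by omega]
    apply List.map_congr_left
    intro k hk
    simp
  rw [hPyR, ← ((hordperm.map (fun i => pvCnt q i * res.getD i.toNat 0)).sum_eq)]
  have stepA4 : ord.map (fun i => pvCnt q i * res.getD i.toNat 0)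
      = (ord.zip aS).map (fun p => pvCnt q p.1 * p.2) := by
    apply List.ext_getElem (by simp; omega)
    intro k h1 h2
    simp only [List.getElem_map, List.getElem_zip]
    have hk : k < (ord.zip aS).length := by simpa using h2
    have hmem : (ord.zip aS)[k] ∈ ord.zip aS := List.getElem_mem hk
    have := hresget _ hmem
    rw [List.getElem_zip] at this
    simp only at this
    rw [this]
  rw [stepA4]
  have stepA5 : (ord.zip aS).map (fun p => pvCnt q p.1 * p.2)
      = (ord.zip aS).map (fun p => PySem.List.pyGetD fA p.1 0 * p.2) := by
    apply List.map_congr_left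
    intro p hp
    have h1 := (List.of_mem_zip hp).1
    obtain ⟨hp0, hpn⟩ := hordmem p.1 h1
    rw [PySem.List.pyGetD_eq_getElem fA 0 hp0 (by rw [hfAlen]; exact hpn)]
    rw [← List.getD_eq_getElem fA 0]
    rw [hfAget p.1.toNat (by omega), hrep]
    rw [Int.toNat_of_nonneg hp0]
    ring
  rw [stepA5]
  have stepA6 : (ord.zip aS).map (fun p => PySem.List.pyGetD fA p.1 0 * p.2)
      = ((ord.map (fun i => PySem.List.pyGetD fA i 0)).zip aS).map (fun p => p.1 * p.2) := by
    rw [List.zip_map_left, List.map_map]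
    rfl
  rw [stepA6]
  have hOM : ord.map (fun i => PySem.List.pyGetD fA i 0)
      = PySem.List.sorted freqL (fun x => x) true := by
    rw [hord, hfAeq]
    have hthis := pvOrderMap freqL
    rw [hfreqLlen] at hthis
    exact hthis
  rw [hOM]

-- ===== VERDICT (by name: the statement is the Claim_ definition above) =====
theorem solution_spec : Claim_equal_solution := by
  intro a q _ hpre
  exact pvMain a q hpre
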